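-- pv_equiv track=rewrite | github.com/Sri-Krishna-V/Team_FTP_EDP | backend/api/capital_management.py | _parse_scheme_info
-- ===== SOURCE A (Python) =====
-- from typing import List, Dict, Any
--
-- def _parse_scheme_info(text: str) -> List[Dict]:
--     """
--     Parse scheme information from LLM output
--     Returns a list of dictionaries containing scheme details
--     """
--     # This is a simplified parser - in production, use regex or a more robust approach
--     schemes = []
--     current_scheme = None
--
--     for line in text.split('\n'):
--         line = line.strip()
--         if not line:
--             continue
--
--         # Check if this is a new scheme name (simplified heuristic)
--         if line.isupper() or "Scheme:" in line or "SCHEME" in line: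
--             if current_scheme:
--                 schemes.append(current_scheme)
--             current_scheme = {"name": line.replace("Scheme:", "").strip()}
--         elif current_scheme:
--             # Add details to current scheme
--             if "eligibility" in line.lower():
--                 current_scheme["eligibility"] = line.split(
--                     ":", 1)[1].strip() if ":" in line else line
--             elif "funding" in line.lower() or "amount" in line.lower():
--                 current_scheme["max_funding"] = line.split(
--                     ":", 1)[1].strip() if ":" in line else line
--             elif "sector" in line.lower():
--                 current_scheme["target_sectors"] = line.split(
--                     ":", 1)[1].strip() if ":" in line else line
--             elif "application" in line.lower() or "process" in line.lower():
--                 current_scheme["application_process"] = line.split(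
--                     ":", 1)[1].strip() if ":" in line else line
--             elif "document" in line.lower():
--                 current_scheme["required_documents"] = line.split(
--                     ":", 1)[1].strip() if ":" in line else line
--             elif "deadline" in line.lower():
--                 current_scheme["deadlines"] = line.split(
--                     ":", 1)[1].strip() if ":" in line else line
--             elif "agency" in line.lower() or "ministry" in line.lower():
--                 current_scheme["implementing_agency"] = line.split(
--                     ":", 1)[1].strip() if ":" in line else line
--
--     # Add the last scheme
--     if current_scheme:
--         schemes.append(current_scheme)
--
--     return schemes
-- ===== SOURCE B (Python) =====
-- from typing import List, Dict, Any
--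
-- _FIELDS = [
--     (("eligibility",), "eligibility"),
--     (("funding", "amount"), "max_funding"),
--     (("sector",), "target_sectors"),
--     (("application", "process"), "application_process"),
--     (("document",), "required_documents"),
--     (("deadline",), "deadlines"),
--     (("agency", "ministry"), "implementing_agency"),
-- ]
--
--
-- def _is_header(line: str) -> bool:
--     return line.isupper() or "Scheme:" in line or "SCHEME" in line
--
--
-- def _field_value(line: str) -> str:
--     return line.split(":", 1)[1].strip() if ":" in line else line
--
--
-- def _parse_scheme_info(text: str) -> List[Dict]:
--     # Pass 1: group stripped non-empty lines into (header name, detail lines) blocks,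
--     # dropping detail lines that precede the first header.
--     blocks = []
--     for raw in text.split('\n'):
--         line = raw.strip()
--         if not line:
--             continue
--         if _is_header(line):
--             blocks.append((line.replace("Scheme:", "").strip(), []))
--         elif blocks:
--             blocks[-1][1].append(line)
--     # Pass 2: build one dict per block, table-driven field matching (first match wins).
--     result = []
--     for name, details in blocks:
--         scheme = {"name": name}
--         for line in details:
--             low = line.lower()
--             for keywords, field in _FIELDS:
--                 if any(k in low for k in keywords):
--                     scheme[field] = _field_value(line)
--                     break
--         result.append(scheme)
--     return result
-- ===== Notes on version B (the rewrite author's own statement) =====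
-- stated objective: alternative
-- what changed: Replaces A's single stateful loop (schemes list + mutable current_scheme with an inline elif chain) by two passes: first group stripped non-empty lines into (header, detail-lines) blocks, then map each block to a dict with a table-driven first-match field matcher.
import Mathlib
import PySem

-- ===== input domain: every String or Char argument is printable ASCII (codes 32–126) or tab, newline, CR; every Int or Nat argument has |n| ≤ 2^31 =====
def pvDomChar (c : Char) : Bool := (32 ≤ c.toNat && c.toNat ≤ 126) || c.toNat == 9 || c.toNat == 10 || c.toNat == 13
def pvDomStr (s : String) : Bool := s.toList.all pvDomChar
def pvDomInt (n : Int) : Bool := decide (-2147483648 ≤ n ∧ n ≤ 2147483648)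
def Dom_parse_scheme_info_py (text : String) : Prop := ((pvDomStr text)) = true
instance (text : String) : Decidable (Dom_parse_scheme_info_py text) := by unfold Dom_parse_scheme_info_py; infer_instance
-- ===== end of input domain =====

-- B replaces A's single stateful line loop by a grouping pass into (header, details) blocks
-- plus a table-driven field matcher mapped over the blocks (objective: alternative).


-- ===== PORT A =====
-- Python str.isupper(), exact on the ASCII domain (cased chars in ASCII are exactly the letters):
-- at least one cased character and no lowercase character.
def pvIsupper (s : String) : Bool :=
  s.toList.any PySem.Chars.isalpha && !(s.toList.any PySem.Chars.islower)

-- line.split(":", 1)[1].strip() if ":" in line else line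
-- (the [1] index exists whenever ":" is in line, so the .getD defaults are never taken)
def pvFieldValue (line : String) : String :=
  if PySem.Str.isIn ":" line then
    PySem.Str.strip ((PySem.List.pyGet? ((PySem.Str.splitMax? line ":" 1).getD []) 1).getD "")
  else line

-- the elif chain adding one detail line to current_scheme
def detailA (d : PySem.Dict String String) (line : String) : PySem.Dict String String :=
  let low := PySem.Str.lower line
  if PySem.Str.isIn "eligibility" low then d.insert "eligibility" (pvFieldValue line)
  else if PySem.Str.isIn "funding" low || PySem.Str.isIn "amount" low then d.insert "max_funding" (pvFieldValue line)
  else if PySem.Str.isIn "sector" low then d.insert "target_sectors" (pvFieldValue line)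
  else if PySem.Str.isIn "application" low || PySem.Str.isIn "process" low then d.insert "application_process" (pvFieldValue line)
  else if PySem.Str.isIn "document" low then d.insert "required_documents" (pvFieldValue line)
  else if PySem.Str.isIn "deadline" low then d.insert "deadlines" (pvFieldValue line)
  else if PySem.Str.isIn "agency" low || PySem.Str.isIn "ministry" low then d.insert "implementing_agency" (pvFieldValue line)
  else d

-- one iteration of A's loop over the raw lines; state = (schemes, current_scheme)
def stepA (st : List (PySem.Dict String String) × Option (PySem.Dict String String)) (raw : String) :
    List (PySem.Dict String String) × Option (PySem.Dict String String) :=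
  let line := PySem.Str.strip raw
  if line = "" then st
  else if pvIsupper line || PySem.Str.isIn "Scheme:" line || PySem.Str.isIn "SCHEME" line then
    (match st.2 with
      | some d => st.1 ++ [d]
      | none => st.1,
     some (PySem.Dict.empty.insert "name" (PySem.Str.strip (PySem.Str.replace line "Scheme:" ""))))
  else
    match st.2 with
    | none => st
    | some d => (st.1, some (detailA d line))

def parse_scheme_info_py (text : String) : List (List (String × String)) :=
  let st := ((PySem.Str.split? text "\n").getD []).foldl stepA ([], none)
  (match st.2 with
    | some d => st.1 ++ [d]
    | none => st.1).map PySem.Dict.items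

-- ===== PORT B =====
def pvFields : List (List String × String) :=
  [(["eligibility"], "eligibility"),
   (["funding", "amount"], "max_funding"),
   (["sector"], "target_sectors"),
   (["application", "process"], "application_process"),
   (["document"], "required_documents"),
   (["deadline"], "deadlines"),
   (["agency", "ministry"], "implementing_agency")]

def isHeaderB (line : String) : Bool :=
  pvIsupper line || PySem.Str.isIn "Scheme:" line || PySem.Str.isIn "SCHEME" line

-- pass 1: one step of grouping the lines into (name, detail-lines) blocks
def stepGroup (bs : List (String × List String)) (raw : String) : List (String × List String) :=
  let line := PySem.Str.strip raw
  if line = "" then bs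
  else if isHeaderB line then
    bs ++ [(PySem.Str.strip (PySem.Str.replace line "Scheme:" ""), [])]
  else
    match bs.getLast? with
    | none => bs
    | some b => bs.dropLast ++ [(b.1, b.2 ++ [line])]

-- pass 2: table-driven, first matching field wins
def detailB (d : PySem.Dict String String) (line : String) : PySem.Dict String String :=
  let low := PySem.Str.lower line
  match pvFields.find? (fun kf => kf.1.any (fun k => PySem.Str.isIn k low)) with
  | some kf => d.insert kf.2 (pvFieldValue line)
  | none => d

def mkScheme (b : String × List String) : PySem.Dict String String :=
  b.2.foldl detailB (PySem.Dict.empty.insert "name" b.1)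

def parse_scheme_info_py_alt (text : String) : List (List (String × String)) :=
  (((PySem.Str.split? text "\n").getD []).foldl stepGroup []).map (fun b => (mkScheme b).items)

-- ===== PRECONDITION & SPEC =====
def Spec_parse_scheme_info_py (text : String) (out : List (List (String × String))) : Prop := out = parse_scheme_info_py_alt text
instance (text : String) (out : List (List (String × String))) : Decidable (Spec_parse_scheme_info_py text out) := by unfold Spec_parse_scheme_info_py; infer_instance

-- ===== CLAIM (what is proved, stated in full; the proofs are below) =====
def Claim_equal_parse_scheme_info_py : Prop := ∀ (text : String), Dom_parse_scheme_info_py text → Spec_parse_scheme_info_py text (parse_scheme_info_py text)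

-- ===== LEMMAS AND PROOFS =====

-- B's table lookup is A's elif chain
lemma detailB_eq (d : PySem.Dict String String) (line : String) :
    detailB d line = detailA d line := by
  simp only [detailB, detailA, pvFields, List.find?_cons, List.find?_nil, List.any_cons,
    List.any_nil, Bool.or_false]
  split_ifs <;> simp_all only [Bool.not_eq_true]

-- the A-state corresponding to a block list: finished blocks mapped, last block as current_scheme
def absState (bs : List (String × List String)) :
    List (PySem.Dict String String) × Option (PySem.Dict String String) :=
  match bs.getLast? with
  | none => ([], none)
  | some b => (bs.dropLast.map mkScheme, some (mkScheme b))

lemma finalize_absState (bs : List (String × List String)) :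
    (match (absState bs).2 with
      | some d => (absState bs).1 ++ [d]
      | none => (absState bs).1) = bs.map mkScheme := by
  rcases bs.eq_nil_or_concat with rfl | ⟨bs', b, rfl⟩
  · rfl
  · simp [absState]

lemma step_eq (bs : List (String × List String)) (raw : String) :
    stepA (absState bs) raw = absState (stepGroup bs raw) := by
  unfold stepA stepGroup isHeaderB
  by_cases h0 : PySem.Str.strip raw = ""
  · simp [h0]
  · simp only [h0, if_false]
    by_cases hh : (pvIsupper (PySem.Str.strip raw)
        || PySem.Str.isIn "Scheme:" (PySem.Str.strip raw)
        || PySem.Str.isIn "SCHEME" (PySem.Str.strip raw)) = true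
    · simp only [hh, if_true]
      rcases bs.eq_nil_or_concat with rfl | ⟨bs', b, rfl⟩
      · rfl
      · simp [absState, List.dropLast_concat, mkScheme, List.map_append]
    · simp only [Bool.not_eq_true] at hh
      simp only [hh, Bool.false_eq_true, if_false]
      rcases bs.eq_nil_or_concat with rfl | ⟨bs', b, rfl⟩
      · rfl
      · simp only [absState, List.dropLast_concat]
        simp [List.getLast?_concat, mkScheme, List.foldl_append, detailB_eq]

lemma loop_eq (l : List String) (bs : List (String × List String)) :
    l.foldl stepA (absState bs) = absState (l.foldl stepGroup bs) := by
  induction l generalizing bs with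
  | nil => rfl
  | cons raw l ih =>
    simp only [List.foldl_cons, step_eq]
    exact ih _

-- ===== VERDICT (by name: the statement is the Claim_ definition above) =====
theorem parse_scheme_info_py_spec : Claim_equal_parse_scheme_info_py := by
  intro text _
  unfold Spec_parse_scheme_info_py parse_scheme_info_py parse_scheme_info_py_alt
  have h := loop_eq ((PySem.Str.split? text "\n").getD []) []
  simp only [show absState [] = ([], none) from rfl] at h
  simp only [h, finalize_absState, List.map_map]
  rfl
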